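-- pv_equiv track=rewrite | github.com/RamanRed/TE-Backend | src/database/schema.py | _split_cypher_statements
-- ===== SOURCE A (Python) =====
-- from typing import List, Dict, Any, Optional
--
-- def _split_cypher_statements(content: str) -> List[str]:
--     """
--     Split Cypher content into individual statements.
--
--     Args:
--         content: Raw Cypher content
--
--     Returns:
--         List of individual Cypher statements
--     """
--     statements = []
--     current_statement = []
--     in_multiline_comment = False
--
--     for line in content.split('\n'):
--         line = line.strip()
--
--         # Handle multiline comments
--         if line.startswith('/*'):
--             in_multiline_comment = True
--         if in_multiline_comment:
--             if '*/' in line: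
--                 in_multiline_comment = False
--             continue
--
--         # Skip single-line comments and empty lines
--         if line.startswith('//') or line.startswith('--') or not line:
--             continue
--
--         current_statement.append(line)
--
--         # Check for statement end
--         if line.endswith(';'):
--             statement = ' '.join(current_statement)
--             statements.append(statement)
--             current_statement = []
--
--     # Add any remaining statement
--     if current_statement:
--         statement = ' '.join(current_statement)
--         if statement.strip():
--             statements.append(statement)
--
--     return statements
-- ===== SOURCE B (Python) =====
-- from typing import List
--
-- def _split_cypher_statements(content: str) -> List[str]:
--     # Pre-strip every line once, then walk by index: comment blocks are skipped
--     # with an inner index scan (no boolean flag), and statements are produced by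
--     # cutting the kept lines at semicolon positions with slices (no running
--     # current-statement accumulator).
--     lines = [raw.strip() for raw in content.split('\n')]
--     n = len(lines)
--     kept = []
--     i = 0
--     while i < n:
--         line = lines[i]
--         if line.startswith('/*'):
--             # skip the whole block, including the line carrying '*/'
--             while i < n and '*/' not in lines[i]:
--                 i += 1
--             i += 1
--             continue
--         if line and not line.startswith('//') and not line.startswith('--'):
--             kept.append(line)
--         i += 1
--     statements = []
--     start = 0
--     while True:
--         end = next((j for j in range(start, len(kept)) if kept[j].endswith(';')), None)
--         if end is None:
--             break
--         statements.append(' '.join(kept[start:end + 1]))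
--         start = end + 1
--     tail = ' '.join(kept[start:])
--     if tail.strip():
--         statements.append(tail)
--     return statements
-- ===== Notes on version B (the rewrite author's own statement) =====
-- stated objective: alternative
-- what changed: A's single fused state machine (comment flag + running current-statement accumulator) is replaced by pre-stripping all lines, index-based skipping of comment blocks with an inner scan instead of a boolean flag, and cutting the kept-line list into statements by slicing at semicolon positions instead of accumulating lines.
import Mathlib
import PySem

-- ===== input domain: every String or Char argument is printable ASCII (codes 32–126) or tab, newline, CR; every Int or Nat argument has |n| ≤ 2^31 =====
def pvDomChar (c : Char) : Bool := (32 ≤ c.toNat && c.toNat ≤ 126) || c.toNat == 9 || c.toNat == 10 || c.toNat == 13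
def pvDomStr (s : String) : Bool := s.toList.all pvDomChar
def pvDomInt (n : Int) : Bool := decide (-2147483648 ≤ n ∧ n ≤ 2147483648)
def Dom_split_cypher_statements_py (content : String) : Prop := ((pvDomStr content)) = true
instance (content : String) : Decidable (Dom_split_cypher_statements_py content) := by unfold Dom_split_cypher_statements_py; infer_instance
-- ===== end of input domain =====

-- B replaces A's fused comment-flag + accumulator state machine by pre-stripped lines,
-- index-based comment-block skipping and slicing the kept lines at semicolons (objective: alternative).

-- ===== PORT A =====
-- A's single loop: state (statements, current_statement, in_multiline_comment).
def pvA_loop : List String → List String → List String → Bool → List String × List String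
  | [], stmts, cur, _ => (stmts, cur)
  | l :: rest, stmts, cur, inC =>
    let line := PySem.Str.strip l
    let inC1 := if PySem.Str.startswith line "/*" then true else inC
    if inC1 then
      pvA_loop rest stmts cur (if PySem.Str.isIn "*/" line then false else inC1)
    else if PySem.Str.startswith line "//" || PySem.Str.startswith line "--" || line == "" then
      pvA_loop rest stmts cur inC1
    else
      let cur' := cur ++ [line]
      if PySem.Str.endswith line ";" then
        pvA_loop rest (stmts ++ [PySem.Str.join " " cur']) [] inC1
      else
        pvA_loop rest stmts cur' inC1

def split_cypher_statements_py (content : String) : List String :=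
  let r := pvA_loop ((PySem.Str.split? content "\n").getD []) [] [] false
  if r.2 ≠ [] then
    let statement := PySem.Str.join " " r.2
    if PySem.Str.strip statement ≠ "" then r.1 ++ [statement] else r.1
  else r.1

-- ===== PORT B =====
-- B's inner index scan: drop lines up to and including the one containing '*/'.
def pvB_skip : List String → List String
  | [] => []
  | l :: rest => if PySem.Str.isIn "*/" l then rest else pvB_skip rest

lemma pvB_skip_le (xs : List String) : (pvB_skip xs).length ≤ xs.length := by
  induction xs with
  | nil => simp [pvB_skip]
  | cons l rest ih => simp only [pvB_skip]; split_ifs <;> simp; omega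

lemma pvB_skip_cons_le (l : String) (rest : List String) :
    (pvB_skip (l :: rest)).length ≤ rest.length := by
  simp only [pvB_skip]; split_ifs
  · exact le_refl _
  · exact pvB_skip_le rest

-- B's outer index walk over the pre-stripped lines, collecting kept lines.
def pvB_keep : List String → List String
  | [] => []
  | l :: rest =>
    if PySem.Str.startswith l "/*" then pvB_keep (pvB_skip (l :: rest))
    else if l != "" && !PySem.Str.startswith l "//" && !PySem.Str.startswith l "--" then
      l :: pvB_keep rest
    else pvB_keep rest
termination_by xs => xs.length
decreasing_by
  · exact Nat.lt_succ_of_le (pvB_skip_cons_le _ _)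
  · simp
  · simp

-- index of the first kept line ending with ';' (B's `next(...)` scan)
def pvFindSemi : List String → Option Nat
  | [] => none
  | l :: rest => if PySem.Str.endswith l ";" then some 0 else (pvFindSemi rest).map (· + 1)

lemma pvFindSemi_lt {xs : List String} {j : Nat} (h : pvFindSemi xs = some j) : j < xs.length := by
  induction xs generalizing j with
  | nil => simp [pvFindSemi] at h
  | cons l rest ih =>
    simp only [pvFindSemi] at h
    split_ifs at h with hl
    · cases h; simp
    · rcases Option.map_eq_some_iff.mp h with ⟨j', hj', rfl⟩
      have := ih hj'; simp; omega

-- B's slicing loop: cut at the first ';' line, recurse on the rest; tail joined and kept if non-blank.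
def pvB_group (kept : List String) : List String :=
  match h : pvFindSemi kept with
  | some j => PySem.Str.join " " (kept.take (j + 1)) :: pvB_group (kept.drop (j + 1))
  | none =>
    let tail := PySem.Str.join " " kept
    if PySem.Str.strip tail ≠ "" then [tail] else []
termination_by kept.length
decreasing_by
  have := pvFindSemi_lt h; simp; omega

def split_cypher_statements_py_alt (content : String) : List String :=
  let lines := ((PySem.Str.split? content "\n").getD []).map PySem.Str.strip
  pvB_group (pvB_keep lines)

-- ===== PRECONDITION & SPEC =====
def Spec_split_cypher_statements_py (content : String) (out : List String) : Prop := out = split_cypher_statements_py_alt content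
instance (content : String) (out : List String) : Decidable (Spec_split_cypher_statements_py content out) := by unfold Spec_split_cypher_statements_py; infer_instance

-- ===== CLAIM (what is proved, stated in full; the proofs are below) =====
def Claim_equal_split_cypher_statements_py : Prop := ∀ (content : String), Dom_split_cypher_statements_py content → Spec_split_cypher_statements_py content (split_cypher_statements_py content)

-- ===== LEMMAS AND PROOFS =====
-- Ghost flag-based filter (A's comment machinery isolated) used only in the proofs.
def pvGFilter : List String → Bool → List String
  | [], _ => []
  | l :: rest, inC =>
    let line := PySem.Str.strip l
    let inC1 := if PySem.Str.startswith line "/*" then true else inC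
    if inC1 then
      pvGFilter rest (if PySem.Str.isIn "*/" line then false else inC1)
    else if line != "" && !PySem.Str.startswith line "//" && !PySem.Str.startswith line "--" then
      line :: pvGFilter rest inC1
    else
      pvGFilter rest inC1

-- Ghost accumulator grouping (A's statement machinery isolated).
def pvGAcc : List String → List String → List String → List String × List String
  | [], stmts, group => (stmts, group)
  | line :: rest, stmts, group =>
    let g' := group ++ [line]
    if PySem.Str.endswith line ";" then
      pvGAcc rest (stmts ++ [PySem.Str.join " " g']) []
    else
      pvGAcc rest stmts g'

-- Ghost grouping with an explicit pending prefix.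
def pvG2 : List String → List String → List String
  | cur, [] =>
    let t := PySem.Str.join " " cur
    if PySem.Str.strip t ≠ "" then [t] else []
  | cur, l :: rest =>
    if PySem.Str.endswith l ";" then PySem.Str.join " " (cur ++ [l]) :: pvG2 [] rest
    else pvG2 (cur ++ [l]) rest

def pvWrap (p : List String × List String) : List String :=
  if p.2 ≠ [] then
    let statement := PySem.Str.join " " p.2
    if PySem.Str.strip statement ≠ "" then p.1 ++ [statement] else p.1
  else p.1

-- A's fused loop equals the ghost filter followed by the ghost accumulator grouping.
lemma pvA_loop_eq (lines : List String) : ∀ (stmts cur : List String) (inC : Bool),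
    pvA_loop lines stmts cur inC = pvGAcc (pvGFilter lines inC) stmts cur := by
  induction lines with
  | nil => intro stmts cur inC; rfl
  | cons l rest ih =>
    intro stmts cur inC
    simp only [pvA_loop, pvGFilter]
    by_cases h1 : (if PySem.Str.startswith (PySem.Str.strip l) "/*" then true else inC) = true
    · simp only [h1, if_true, ih]
    · rw [if_neg h1, if_neg h1]
      by_cases h2 : PySem.Chars.startswith (PySem.Chars.strip l.toList) ['/', '/'] = true <;>
      by_cases h3 : PySem.Chars.startswith (PySem.Chars.strip l.toList) ['-', '-'] = true <;>
      by_cases h4 : PySem.Str.strip l = "" <;>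
      simp [h2, h3, h4, pvGAcc, ih]

-- The ghost flag filter equals B's index-skip filter on the pre-stripped lines.
lemma pvGFilter_eq (lines : List String) :
    pvGFilter lines false = pvB_keep (lines.map PySem.Str.strip) ∧
    pvGFilter lines true = pvB_keep (pvB_skip (lines.map PySem.Str.strip)) := by
  induction lines with
  | nil => constructor <;> simp [pvGFilter, pvB_keep, pvB_skip]
  | cons l rest ih =>
    have hskip : pvB_skip (PySem.Str.strip l :: rest.map PySem.Str.strip)
        = if PySem.Chars.isIn ['*', '/'] (PySem.Chars.strip l.toList) = true
          then rest.map PySem.Str.strip else pvB_skip (rest.map PySem.Str.strip) := by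
      simp [pvB_skip]
    constructor
    · by_cases h1 : PySem.Chars.startswith (PySem.Chars.strip l.toList) ['/', '*'] = true
      · by_cases h2 : PySem.Chars.isIn ['*', '/'] (PySem.Chars.strip l.toList) = true
        · simp [pvGFilter, pvB_keep, h1, hskip, h2, ih.1]
        · simp [pvGFilter, pvB_keep, h1, hskip, h2, ih.2]
      · by_cases h4 : PySem.Str.strip l = ""
        · simp [pvGFilter, pvB_keep, h4]
          simpa [h4] using ih.1
        · by_cases h2 : PySem.Chars.startswith (PySem.Chars.strip l.toList) ['/', '/'] = true <;>
          by_cases h3 : PySem.Chars.startswith (PySem.Chars.strip l.toList) ['-', '-'] = true <;>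
          simp [pvGFilter, pvB_keep, h1, h2, h3, h4, ih.1]
    · by_cases h2 : PySem.Chars.isIn ['*', '/'] (PySem.Chars.strip l.toList) = true
      · simp [pvGFilter, hskip, h2, ih.1, ite_self]
      · simp [pvGFilter, hskip, h2, ih.2, ite_self]

-- A's wrapped accumulator grouping equals the pending-prefix ghost grouping.
lemma pvGAcc_wrap (kept : List String) : ∀ (stmts cur : List String),
    pvWrap (pvGAcc kept stmts cur) = stmts ++ pvG2 cur kept := by
  induction kept with
  | nil =>
    intro stmts cur
    simp only [pvGAcc, pvWrap, pvG2]
    rcases cur with _ | ⟨c, cs⟩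
    · simp [show PySem.Str.strip (PySem.Str.join " " ([] : List String)) = "" from rfl]
    · simp only [ne_eq, reduceCtorEq, not_false_eq_true, if_true]
      split_ifs <;> simp
  | cons l rest ih =>
    intro stmts cur
    by_cases h : PySem.Chars.endswith l.toList [';'] = true
    · simp [pvGAcc, pvG2, h, ih, List.append_assoc]
    · simp [pvGAcc, pvG2, h, ih]

-- The pending-prefix ghost grouping characterised by the first-semicolon index.
lemma pvG2_eq (kept : List String) : ∀ (cur : List String),
    pvG2 cur kept = match pvFindSemi kept with
      | some j => PySem.Str.join " " (cur ++ kept.take (j + 1)) :: pvB_group (kept.drop (j + 1))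
      | none =>
        let t := PySem.Str.join " " (cur ++ kept)
        if PySem.Str.strip t ≠ "" then [t] else [] := by
  induction kept with
  | nil => intro cur; simp [pvG2, pvFindSemi]
  | cons l rest ih =>
    intro cur
    by_cases h : PySem.Chars.endswith l.toList [';'] = true
    · have hrest : pvG2 [] rest = pvB_group rest := by
        rw [ih []]
        rw [pvB_group.eq_def]
        cases hf : pvFindSemi rest <;> simp
      simp [pvG2, pvFindSemi, h, hrest]
    · cases hf : pvFindSemi rest with
      | none => simp [pvG2, pvFindSemi, h, hf, ih, List.append_assoc]
      | some j => simp [pvG2, pvFindSemi, h, hf, ih, List.append_assoc]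

lemma pvG2_nil_eq (kept : List String) : pvG2 [] kept = pvB_group kept := by
  rw [pvG2_eq, pvB_group.eq_def]
  cases hf : pvFindSemi kept <;> simp

-- ===== VERDICT (by name: the statement is the Claim_ definition above) =====
theorem split_cypher_statements_py_spec : Claim_equal_split_cypher_statements_py := by
  intro content _
  unfold Spec_split_cypher_statements_py split_cypher_statements_py split_cypher_statements_py_alt
  have : pvWrap (pvA_loop ((PySem.Str.split? content "\n").getD []) [] [] false)
      = pvB_group (pvB_keep (((PySem.Str.split? content "\n").getD []).map PySem.Str.strip)) := by
    rw [pvA_loop_eq, pvGAcc_wrap, (pvGFilter_eq _).1, List.nil_append, pvG2_nil_eq]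
  simpa [pvWrap] using this
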